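-- pv_equiv track=rewrite | github.com/almamun80git/TexitEditor | texiteditor.py | _int_to_index
-- ===== SOURCE A (Python) =====
-- def _int_to_index(pos: int, text: str) -> str:
--     if pos <= 0:
--         return "1.0"
--     if pos >= len(text):
--         lines = text.splitlines()
--         if not lines:
--             return "1.0"
--         return f"{len(lines)}.{len(lines[-1])}"
--     line = 1
--     col = 0
--     for ch in text:
--         if pos == 0:
--             break
--         if ch == "\n":
--             line += 1
--             col = 0
--         else:
--             col += 1
--         pos -= 1
--     return f"{line}.{col}"
-- ===== SOURCE B (Python) =====
-- def _int_to_index(pos: int, text: str) -> str: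
--     if pos <= 0:
--         return "1.0"
--     if pos >= len(text):
--         lines = text.splitlines()
--         if not lines:
--             return "1.0"
--         return f"{len(lines)}.{len(lines[-1])}"
--     seg = text[:pos]
--     line = seg.count("\n") + 1
--     col = len(seg) - (seg.rfind("\n") + 1)
--     return f"{line}.{col}"
-- ===== Notes on version B (the rewrite author's own statement) =====
-- stated objective: simpler
-- what changed: The stateful character loop with a countdown/break over the text is replaced by slicing off text[:pos] and computing line/col directly with str.count and str.rfind; the two guard branches are unchanged.
import Mathlib
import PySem

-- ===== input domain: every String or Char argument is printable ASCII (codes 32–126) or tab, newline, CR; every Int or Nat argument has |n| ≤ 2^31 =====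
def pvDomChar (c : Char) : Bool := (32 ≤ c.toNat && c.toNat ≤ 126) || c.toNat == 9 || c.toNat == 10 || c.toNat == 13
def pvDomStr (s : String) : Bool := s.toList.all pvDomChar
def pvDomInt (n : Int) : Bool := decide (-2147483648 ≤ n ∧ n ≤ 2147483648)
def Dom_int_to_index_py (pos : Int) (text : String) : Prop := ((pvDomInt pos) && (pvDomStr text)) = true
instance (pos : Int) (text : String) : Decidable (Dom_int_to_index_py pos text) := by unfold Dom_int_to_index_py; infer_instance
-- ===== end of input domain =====

-- B replaces A's stateful character loop over the whole text by count/rfind on the slice text[:pos]; the two guard branches are the same.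

-- ===== PORT A =====
-- the 'for ch in text' loop with its break, carrying state (line, col, pos)
def int_to_index_loopA : List Char → Int → Int → Int → Int × Int
  | [], line, col, _ => (line, col)
  | ch :: rest, line, col, pos =>
    if pos = 0 then (line, col)
    else if ch = '\n' then int_to_index_loopA rest (line + 1) 0 (pos - 1)
    else int_to_index_loopA rest line (col + 1) (pos - 1)

def int_to_index_py (pos : Int) (text : String) : String :=
  if pos ≤ 0 then "1.0"
  else if pos ≥ PySem.Str.len text then
    let lines := PySem.Str.splitlines text
    if lines = [] then "1.0"
    else PySem.Int.toStr (lines.length : Int) ++ "." ++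
         PySem.Int.toStr (PySem.Str.len (PySem.List.pyGetD lines (-1) ""))  -- lines[-1]; guarded nonempty
  else
    let p := int_to_index_loopA text.toList 1 0 pos
    PySem.Int.toStr p.1 ++ "." ++ PySem.Int.toStr p.2

-- ===== PORT B =====
def int_to_index_py_alt (pos : Int) (text : String) : String :=
  if pos ≤ 0 then "1.0"
  else if pos ≥ PySem.Str.len text then
    let lines := PySem.Str.splitlines text
    if lines = [] then "1.0"
    else PySem.Int.toStr (lines.length : Int) ++ "." ++
         PySem.Int.toStr (PySem.Str.len (PySem.List.pyGetD lines (-1) ""))  -- lines[-1]; guarded nonempty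
  else
    let seg := PySem.Str.slice text none (some pos)
    let line := (PySem.Str.count seg "\n" : Int) + 1
    let col := PySem.Str.len seg - (PySem.Str.rfind seg "\n" + 1)
    PySem.Int.toStr line ++ "." ++ PySem.Int.toStr col

-- ===== PRECONDITION & SPEC =====
def Spec_int_to_index_py (pos : Int) (text : String) (out : String) : Prop := out = int_to_index_py_alt pos text
instance (pos : Int) (text : String) (out : String) : Decidable (Spec_int_to_index_py pos text out) := by unfold Spec_int_to_index_py; infer_instance

-- ===== CLAIM (what is proved, stated in full; the proofs are below) =====
def Claim_equal_int_to_index_py : Prop := ∀ (pos : Int) (text : String), Dom_int_to_index_py pos text → Spec_int_to_index_py pos text (int_to_index_py pos text)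

-- ===== LEMMAS AND PROOFS =====

-- one step of A's loop body, as a fold step over (line, col)
def pvStep (p : Int × Int) (ch : Char) : Int × Int :=
  if ch = '\n' then (p.1 + 1, 0) else (p.1, p.2 + 1)

theorem loopA_eq_foldl (cs : List Char) (n : Nat) (line col : Int) :
    int_to_index_loopA cs line col (n : Int) = (cs.take n).foldl pvStep (line, col) := by
  induction cs generalizing n line col with
  | nil => simp [int_to_index_loopA]
  | cons c rest ih =>
    cases n with
    | zero => simp [int_to_index_loopA]
    | succ m =>
      by_cases hc : c = '\n' <;>
        simp [int_to_index_loopA, hc, ih, pvStep] <;>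
        exact fun h => absurd h (by omega)

theorem count_go_eq (fuel : Nat) (l : List Char) (acc : Nat) (h : l.length ≤ fuel) :
    PySem.Chars.count.go ['\n'] fuel l acc = acc + l.count '\n' := by
  induction fuel generalizing l acc with
  | zero =>
    have : l = [] := by cases l <;> simp_all
    subst this; simp [PySem.Chars.count.go]
  | succ f ih =>
    cases l with
    | nil => simp [PySem.Chars.count.go]
    | cons c t =>
      rw [PySem.Chars.count.go]
      have hpre : (['\n'].isPrefixOf (c :: t)) = (c == '\n') := by
        simp [List.isPrefixOf, BEq.comm]
      rw [hpre]
      by_cases hc : c = '\n'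
      · simp only [hc, beq_self_eq_true, if_true, List.length_singleton, List.drop_succ_cons,
          List.drop_zero]
        rw [ih t (acc + 1) (by simp at h; omega)]
        rw [List.count_cons]; simp; omega
      · rw [if_neg (by simpa using hc)]
        rw [ih t acc (by simp at h; omega)]
        rw [List.count_cons]; simp [hc]

theorem count_eq_listCount (l : List Char) :
    PySem.Chars.count l ['\n'] = l.count '\n' := by
  simp [PySem.Chars.count, count_go_eq l.length l 0 le_rfl]

theorem rfind_go_append (l : List Char) (c : Char) (hc : c ≠ '\n') :
    ∀ j, j ≤ l.length → PySem.Chars.rfind.go (l ++ [c]) ['\n'] j = PySem.Chars.rfind.go l ['\n'] j := by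
  intro j
  induction j with
  | zero =>
    intro _
    rw [PySem.Chars.rfind.go, PySem.Chars.rfind.go]
    cases l with
    | nil => simp [List.isPrefixOf]; exact fun h => hc h.symm
    | cons a t => simp [List.isPrefixOf]
  | succ m ih =>
    intro hj
    rw [PySem.Chars.rfind.go, PySem.Chars.rfind.go]
    have hd : List.drop (m + 1) (l ++ [c]) = List.drop (m + 1) l ++ [c] := by
      rw [List.drop_append_of_le_length hj]
    rw [hd]
    have heq : (['\n'].isPrefixOf (List.drop (m + 1) l ++ [c])) = (['\n'].isPrefixOf (List.drop (m + 1) l)) := by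
      cases hdl : List.drop (m + 1) l with
      | nil => simp [List.isPrefixOf]; exact fun h => hc h.symm
      | cons a t => simp [List.isPrefixOf]
    rw [heq, ih (by omega)]

theorem rfind_concat (l : List Char) (c : Char) :
    PySem.Chars.rfind (l ++ [c]) ['\n'] =
      if c = '\n' then (l.length : Int) else PySem.Chars.rfind l ['\n'] := by
  unfold PySem.Chars.rfind
  have hlen : (l ++ [c]).length = l.length + 1 := by simp
  rw [hlen, PySem.Chars.rfind.go]
  have hd : List.drop (l.length + 1) (l ++ [c]) = [] := by simp
  rw [hd]
  have h1 : (['\n'].isPrefixOf ([] : List Char)) = false := by simp [List.isPrefixOf]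
  rw [h1]
  simp only [Bool.false_eq_true, if_false]
  by_cases hcc : c = '\n'
  · subst hcc
    have hd2 : List.drop l.length (l ++ ['\n']) = ['\n'] := by simp
    cases hl : l.length with
    | zero =>
      rw [PySem.Chars.rfind.go]
      have : l = [] := List.eq_nil_of_length_eq_zero hl
      subst this
      simp [List.isPrefixOf]
    | succ m =>
      rw [hl] at hd2
      rw [PySem.Chars.rfind.go, hd2]
      have : (['\n'].isPrefixOf ['\n']) = true := by simp [List.isPrefixOf]
      rw [this]
      simp
  · rw [if_neg hcc]
    cases hl : l.length with
    | zero =>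
      rw [PySem.Chars.rfind.go, PySem.Chars.rfind.go]
      have : l = [] := List.eq_nil_of_length_eq_zero hl
      subst this
      simp [List.isPrefixOf]
      exact fun h => hcc h.symm
    | succ m =>
      rw [← hl]
      exact rfind_go_append l c hcc l.length le_rfl

theorem rfind_nil : PySem.Chars.rfind [] ['\n'] = -1 := by decide

theorem foldl_char (l : List Char) :
    l.foldl pvStep (1, 0) =
      (1 + (l.count '\n' : Int), (l.length : Int) - (PySem.Chars.rfind l ['\n'] + 1)) := by
  induction l using List.reverseRecOn with
  | nil => simp [rfind_nil]
  | append_singleton t c ih =>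
    rw [List.foldl_append, ih, List.foldl_cons, List.foldl_nil, rfind_concat]
    by_cases hc : c = '\n'
    · simp [pvStep, hc, List.count_append]
      omega
    · simp [pvStep, hc, List.count_append]
      omega

-- ===== VERDICT (by name: the statement is the Claim_ definition above) =====
theorem int_to_index_py_spec : Claim_equal_int_to_index_py := by
  intro pos text _
  unfold Spec_int_to_index_py int_to_index_py int_to_index_py_alt
  by_cases h0 : pos ≤ 0
  · rw [if_pos h0, if_pos h0]
  · rw [if_neg h0, if_neg h0]
    by_cases h1 : pos ≥ PySem.Str.len text
    · rw [if_pos h1, if_pos h1]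
    · rw [if_neg h1, if_neg h1]
      simp only []
      have hn : pos = ((pos.toNat : Nat) : Int) := by omega
      have hseg : (PySem.Str.slice text none (some pos)).toList = text.toList.take pos.toNat := by
        rw [hn, PySem.Str.toList_slice, PySem.Chars.slice_eq_listSlice, PySem.List.slice_to_natCast,
          Int.toNat_natCast]
      have hA : int_to_index_loopA text.toList 1 0 pos =
          (1 + ((text.toList.take pos.toNat).count '\n' : Int),
           ((text.toList.take pos.toNat).length : Int) -
             (PySem.Chars.rfind (text.toList.take pos.toNat) ['\n'] + 1)) := by
        rw [hn, loopA_eq_foldl, foldl_char, Int.toNat_natCast]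
      have hnl : ("\n" : String).toList = ['\n'] := by decide
      have hc : (PySem.Str.count (PySem.Str.slice text none (some pos)) "\n" : Int) + 1 =
          1 + ((text.toList.take pos.toNat).count '\n' : Int) := by
        rw [PySem.Str.count_eq, hnl, hseg, count_eq_listCount]; omega
      have hr : PySem.Str.len (PySem.Str.slice text none (some pos)) -
            (PySem.Str.rfind (PySem.Str.slice text none (some pos)) "\n" + 1) =
          ((text.toList.take pos.toNat).length : Int) -
            (PySem.Chars.rfind (text.toList.take pos.toNat) ['\n'] + 1) := by
        rw [PySem.Str.rfind_eq, PySem.Str.len_eq, hnl, hseg]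
      rw [hA, hc, hr]
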